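-- pv_equiv track=rewrite | github.com/eriksoderp/aoc2024 | day2.py | is_safe
-- ===== SOURCE A (Python) =====
-- def is_safe(report):
--     increasing = None
--     for i, level in enumerate(report):
--         if i == len(report) - 1: return 1
--
--         if abs(level - report[i+1]) > 3 or level == report[i+1]:
--             return 0
--         elif level - report[i+1] >= 1:
--             if increasing is None: increasing = False
--             elif increasing: return 0
--         elif report[i+1] - level >= 1:
--             if increasing is None: increasing = True
--             elif not increasing: return 0
-- ===== SOURCE B (Python) =====
-- def is_safe(report):
--     d = [y - x for x, y in zip(report, report[1:])]
--     if all(1 <= x <= 3 for x in d):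
--         return 1
--     if all(-3 <= x <= -1 for x in d):
--         return 1
--     return 0
-- ===== Notes on version B (the rewrite author's own statement) =====
-- stated objective: simpler
-- what changed: Replaces A's indexed loop with Option-Bool direction state by a whole-list judgement on the consecutive-difference list: all consecutive differences between 1 and 3, or all between -3 and -1.
-- outside the precondition, e.g. on is_safe([]): A returns None, B returns 1
import Mathlib
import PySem

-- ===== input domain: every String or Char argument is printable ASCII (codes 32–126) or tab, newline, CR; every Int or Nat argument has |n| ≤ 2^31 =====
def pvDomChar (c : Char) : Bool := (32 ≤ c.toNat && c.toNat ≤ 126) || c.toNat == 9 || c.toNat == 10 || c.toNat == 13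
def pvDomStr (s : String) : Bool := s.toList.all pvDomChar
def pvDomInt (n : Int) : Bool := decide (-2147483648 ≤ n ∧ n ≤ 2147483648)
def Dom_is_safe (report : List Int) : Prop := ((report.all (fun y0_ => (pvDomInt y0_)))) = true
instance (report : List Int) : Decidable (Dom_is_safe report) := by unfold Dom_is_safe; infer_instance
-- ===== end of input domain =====

-- B replaces A's indexed loop carrying an Option-Bool direction flag by a single
-- judgement on the list of consecutive differences (simpler decomposition).
-- Pre_ excludes the empty report, where Python A returns None (not an int).


-- ===== PORT A =====
-- loop over enumerate(report): at the last index return 1; otherwise inspect the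
-- step to report[i+1] (here the next list element) and the 'increasing' flag.
def is_safe_loop : List Int → Option Bool → Option Int
  | [], _ => none                      -- loop falls through: Python returns None
  | [_], _ => some 1                   -- i == len(report) - 1
  | x :: y :: rest, inc =>
    if 3 < |x - y| ∨ x = y then some 0
    else if 1 ≤ x - y then
      match inc with
      | none => is_safe_loop (y :: rest) (some false)   -- increasing = False
      | some true => some 0
      | some false => is_safe_loop (y :: rest) (some false)
    else if 1 ≤ y - x then
      match inc with
      | none => is_safe_loop (y :: rest) (some true)    -- increasing = True
      | some false => some 0
      | some true => is_safe_loop (y :: rest) (some true)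
    else is_safe_loop (y :: rest) inc   -- unreachable in Python too (a branch always fires)

-- on [] Python A returns None (outside Pre_is_safe); .getD 0 only totalises the type
def is_safe (report : List Int) : Int := (is_safe_loop report none).getD 0

-- ===== PORT B =====
def is_safe_alt (report : List Int) : Int :=
  let d := (report.zip (PySem.List.slice report (some 1) none)).map (fun p => p.2 - p.1)
  if d.all (fun x => 1 ≤ x && x ≤ 3) then 1
  else if d.all (fun x => -3 ≤ x && x ≤ -1) then 1
  else 0

-- ===== PRECONDITION & SPEC =====
-- Pre_ excludes only the empty report, on which Python A returns None (no int value).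
def Pre_is_safe (report : List Int) : Prop := report ≠ []
instance (report : List Int) : Decidable (Pre_is_safe report) := by unfold Pre_is_safe; infer_instance
def pvWitness_is_safe : List Int := ([1, 3, 4])

def Spec_is_safe (report : List Int) (out : Int) : Prop := out = is_safe_alt report
instance (report : List Int) (out : Int) : Decidable (Spec_is_safe report out) := by unfold Spec_is_safe; infer_instance

-- ===== CLAIM (what is proved, stated in full; the proofs are below) =====
def Claim_equal_is_safe : Prop := ∀ (report : List Int), Dom_is_safe report → Pre_is_safe report → Spec_is_safe report (is_safe report)

-- ===== LEMMAS AND PROOFS =====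

-- the difference list of x :: l, as B computes it
def diffsOf (x : Int) (l : List Int) : List Int :=
  ((x :: l).zip l).map (fun p => p.2 - p.1)

def upAll (d : List Int) : Bool := d.all (fun x => 1 ≤ x && x ≤ 3)
def downAll (d : List Int) : Bool := d.all (fun x => -3 ≤ x && x ≤ -1)

-- what A's loop computes, as a function of the remaining diffs and the flag
def loopSpec (inc : Option Bool) (d : List Int) : Bool :=
  match inc with
  | none => upAll d || downAll d
  | some true => upAll d
  | some false => downAll d

theorem diffsOf_cons (x y : Int) (l : List Int) :
    diffsOf x (y :: l) = (y - x) :: diffsOf y l := by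
  simp [diffsOf]

theorem upAll_cons (a : Int) (d : List Int) :
    upAll (a :: d) = ((decide (1 ≤ a) && decide (a ≤ 3)) && upAll d) := by
  simp [upAll]

theorem downAll_cons (a : Int) (d : List Int) :
    downAll (a :: d) = ((decide (-3 ≤ a) && decide (a ≤ -1)) && downAll d) := by
  simp [downAll]

theorem is_safe_loop_eq (l : List Int) : ∀ (x : Int) (inc : Option Bool),
    is_safe_loop (x :: l) inc = some (if loopSpec inc (diffsOf x l) then 1 else 0) := by
  induction l with
  | nil =>
      intro x inc
      cases inc with
      | none => simp [is_safe_loop, diffsOf, loopSpec, upAll, downAll]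
      | some b => cases b <;> simp [is_safe_loop, diffsOf, loopSpec, upAll, downAll]
  | cons y rest ih =>
      intro x inc
      simp only [is_safe_loop, diffsOf_cons]
      by_cases h1 : 3 < |x - y| ∨ x = y
      · have h1' : 3 < x - y ∨ 3 < y - x ∨ x = y := by
          rcases h1 with h | h
          · rcases lt_abs.mp h with h' | h'
            · exact Or.inl h'
            · exact Or.inr (Or.inl (by omega))
          · exact Or.inr (Or.inr h)
        rw [if_pos h1]
        have hu : upAll ((y - x) :: diffsOf y rest) = false := by
          rw [upAll_cons]
          have : (decide ((1:Int) ≤ y - x) && decide (y - x ≤ 3)) = false := by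
            simp only [Bool.and_eq_false_iff, decide_eq_false_iff_not, not_le]; omega
          rw [this, Bool.false_and]
        have hd : downAll ((y - x) :: diffsOf y rest) = false := by
          rw [downAll_cons]
          have : (decide ((-3:Int) ≤ y - x) && decide (y - x ≤ -1)) = false := by
            simp only [Bool.and_eq_false_iff, decide_eq_false_iff_not, not_le]; omega
          rw [this, Bool.false_and]
        cases inc with
        | none => simp only [loopSpec, hu, hd, Bool.or_self, if_false, Bool.false_eq_true]
        | some b => cases b <;> simp only [loopSpec, hu, hd, if_false, Bool.false_eq_true]
      · have h1a : ¬ 3 < |x - y| := fun h => h1 (Or.inl h)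
        have h1b : x ≠ y := fun h => h1 (Or.inr h)
        have habs : |x - y| ≤ 3 := by omega
        have hbnd : -3 ≤ x - y ∧ x - y ≤ 3 := abs_le.mp habs
        rw [if_neg h1]
        by_cases h2 : 1 ≤ x - y
        · -- decreasing step: head difference is between -3 and -1
          rw [if_pos h2]
          have hu : upAll ((y - x) :: diffsOf y rest) = false := by
            rw [upAll_cons]
            have : (decide ((1:Int) ≤ y - x) && decide (y - x ≤ 3)) = false := by
              simp only [Bool.and_eq_false_iff, decide_eq_false_iff_not, not_le]; omega
            rw [this, Bool.false_and]
          have hd : downAll ((y - x) :: diffsOf y rest) = downAll (diffsOf y rest) := by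
            rw [downAll_cons]
            have : (decide ((-3:Int) ≤ y - x) && decide (y - x ≤ -1)) = true := by
              simp only [Bool.and_eq_true, decide_eq_true_iff]; omega
            rw [this, Bool.true_and]
          cases inc with
          | none => rw [ih y (some false)]; simp only [loopSpec, hu, hd, Bool.false_or]; rfl
          | some b =>
            cases b
            · rw [ih y (some false)]; simp only [loopSpec, hd]; rfl
            · simp only [loopSpec, hu, if_false, Bool.false_eq_true]
        · rw [if_neg h2]
          have h3 : 1 ≤ y - x := by omega
          rw [if_pos h3]
          -- increasing step: head difference is between 1 and 3
          have hu : upAll ((y - x) :: diffsOf y rest) = upAll (diffsOf y rest) := by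
            rw [upAll_cons]
            have : (decide ((1:Int) ≤ y - x) && decide (y - x ≤ 3)) = true := by
              simp only [Bool.and_eq_true, decide_eq_true_iff]; omega
            rw [this, Bool.true_and]
          have hd : downAll ((y - x) :: diffsOf y rest) = false := by
            rw [downAll_cons]
            have : (decide ((-3:Int) ≤ y - x) && decide (y - x ≤ -1)) = false := by
              simp only [Bool.and_eq_false_iff, decide_eq_false_iff_not, not_le]; omega
            rw [this, Bool.false_and]
          cases inc with
          | none => rw [ih y (some true)]; simp only [loopSpec, hu, hd, Bool.or_false]; rfl
          | some b =>
            cases b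
            · simp only [loopSpec, hd, if_false, Bool.false_eq_true]
            · rw [ih y (some true)]; simp only [loopSpec, hu]; rfl

theorem is_safe_alt_eq (x : Int) (l : List Int) :
    is_safe_alt (x :: l) = (if upAll (diffsOf x l) then 1 else if downAll (diffsOf x l) then 1 else 0) := by
  rw [is_safe_alt]
  rw [PySem.List.slice_from_one]
  simp only [List.tail_cons, diffsOf, upAll, downAll]
  rfl

-- ===== VERDICT (by name: the statement is the Claim_ definition above) =====
theorem is_safe_spec : Claim_equal_is_safe := by
  intro report _ hpre
  cases report with
  | nil => exact absurd rfl hpre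
  | cons x l =>
    show is_safe (x :: l) = is_safe_alt (x :: l)
    rw [is_safe, is_safe_loop_eq, is_safe_alt_eq]
    simp only [loopSpec, Option.getD_some]
    obtain h | h := Bool.eq_false_or_eq_true (upAll (diffsOf x l)) <;>
      obtain h2 | h2 := Bool.eq_false_or_eq_true (downAll (diffsOf x l)) <;>
      simp [h, h2]
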